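-- pv_equiv track=rewrite | github.com/CA2528357431/leetcode-note | LIST2/0934 667.py | constructArray
-- ===== SOURCE A (Python) =====
-- from typing import List
--
-- def constructArray(n: int, k: int) -> List[int]:
--
--     res = [i for i in range(1, n - (k + 1) + 1)]
--     l = n - (k + 1) + 1
--     r = n
--
--     while l < r:
--         res.append(l)
--         l += 1
--         res.append(r)
--         r -= 1
--     if l == r:
--         res.append(l)
--
--     return res
-- ===== SOURCE B (Python) =====
-- def constructArray(n, k):
--     # ascending head 1 .. n-k-1, then an explicit interleave of an ascending
--     # "lows" run and a descending "highs" run covering n-k .. n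
--     head = list(range(1, n - k))
--     t = k + 1
--     lows = list(range(n - k, n - k + (t + 1) // 2))
--     highs = list(range(n, n - t // 2, -1))
--     tail = [x for pair in zip(lows, highs) for x in pair]
--     if len(lows) > len(highs):
--         tail.append(lows[-1])
--     return head + tail
-- ===== Notes on version B (the rewrite author's own statement) =====
-- stated objective: alternative
-- what changed: Replaces A's two-pointer while-loop (append low, append high, move pointers until they meet) with a closed-form construction: build the ascending lows run and the descending highs run as explicit ranges of computed lengths, interleave them with zip, and append the leftover middle low when k+1 is odd.
import Mathlib
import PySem

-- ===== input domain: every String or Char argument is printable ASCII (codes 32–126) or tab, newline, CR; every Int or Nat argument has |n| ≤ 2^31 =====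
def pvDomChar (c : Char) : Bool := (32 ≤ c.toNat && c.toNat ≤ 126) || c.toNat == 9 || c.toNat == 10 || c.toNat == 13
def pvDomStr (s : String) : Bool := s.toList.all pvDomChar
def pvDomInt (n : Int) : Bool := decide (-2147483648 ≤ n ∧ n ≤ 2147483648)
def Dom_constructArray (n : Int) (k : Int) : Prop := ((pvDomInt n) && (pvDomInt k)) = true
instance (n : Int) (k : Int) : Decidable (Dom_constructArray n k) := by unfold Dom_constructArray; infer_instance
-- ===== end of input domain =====

-- B replaces A's two-pointer while-loop by a closed-form build of the lows/highs runs
-- interleaved with zip (objective: alternative decomposition, same cost).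

-- ===== PORT A =====
-- the while loop: each iteration appends (old l, old r) then moves both pointers
def constructArrayGo (l r : Int) (res : List Int) : List Int :=
  if _h : l < r then constructArrayGo (l + 1) (r - 1) (res ++ [l, r])
  else if l = r then res ++ [l] else res
termination_by (r - l).toNat
decreasing_by omega

def constructArray (n : Int) (k : Int) : List Int :=
  constructArrayGo (n - (k + 1) + 1) n (PySem.List.pyRange 1 (n - (k + 1) + 1) 1)

-- ===== PORT B =====
def constructArray_alt (n : Int) (k : Int) : List Int :=
  let head := PySem.List.pyRange 1 (n - k) 1
  let t := k + 1
  let lows := PySem.List.pyRange (n - k) (n - k + PySem.Int.floordiv (t + 1) 2) 1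
  let highs := PySem.List.pyRange n (n - PySem.Int.floordiv t 2) (-1)
  let tail := (lows.zip highs).flatMap (fun p => [p.1, p.2])
  -- lows[-1]: the guard guarantees lows is nonempty, so pyGet? is some; getD 0 never fires
  let tail2 := if lows.length > highs.length
    then tail ++ [(PySem.List.pyGet? lows (-1)).getD 0] else tail
  head ++ tail2

-- ===== PRECONDITION & SPEC =====
def Spec_constructArray (n : Int) (k : Int) (out : List Int) : Prop := out = constructArray_alt n k
instance (n : Int) (k : Int) (out : List Int) : Decidable (Spec_constructArray n k out) := by unfold Spec_constructArray; infer_instance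

-- ===== CLAIM (what is proved, stated in full; the proofs are below) =====
def Claim_equal_constructArray : Prop := ∀ (n : Int) (k : Int), Dom_constructArray n k → Spec_constructArray n k (constructArray n k)

-- ===== LEMMAS AND PROOFS =====

-- zip-interleave + odd leftover, as B writes it
def tailMerge (lows highs : List Int) : List Int :=
  if lows.length > highs.length
  then (lows.zip highs).flatMap (fun p => [p.1, p.2]) ++ [(PySem.List.pyGet? lows (-1)).getD 0]
  else (lows.zip highs).flatMap (fun p => [p.1, p.2])

-- the tail the while loop produces, in B's closed form (t = r - l + 1)
def tailSpec (l r : Int) : List Int :=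
  tailMerge (PySem.List.pyRange l (l + (r - l + 1 + 1) / 2) 1)
            (PySem.List.pyRange r (r - (r - l + 1) / 2) (-1))

theorem fd2_eq (x : Int) : PySem.Int.floordiv x 2 = x / 2 :=
  PySem.Int.floordiv_eq_ediv_of_pos (by omega)

theorem tailSpec_nil (l r : Int) (h : r < l) : tailSpec l r = [] := by
  rw [tailSpec, PySem.List.pyRange_one_eq_nil (by omega), PySem.List.pyRange_neg_one_eq_nil (by omega)]
  simp [tailMerge]

theorem tailSpec_single (l : Int) : tailSpec l l = [l] := by
  rw [tailSpec, show l + (l - l + 1 + 1) / 2 = l + 1 by omega,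
      show l - (l - l + 1) / 2 = l by omega,
      PySem.List.pyRange_one_singleton, PySem.List.pyRange_neg_one_eq_nil (le_refl l)]
  simp [tailMerge, PySem.List.pyGet?_neg_one]

theorem getLast?_cons_ne {α : Type} (x : α) (ys : List α) (h : ys ≠ []) :
    (x :: ys).getLast? = ys.getLast? := by
  cases ys with
  | nil => exact absurd rfl h
  | cons a as => rw [List.getLast?_cons_cons]

theorem tailSpec_step (l r : Int) (h : l < r) :
    tailSpec l r = [l, r] ++ tailSpec (l + 1) (r - 1) := by
  rw [tailSpec, tailSpec,
      show l + (r - l + 1 + 1) / 2 = l + 1 + (r - 1 - (l + 1) + 1 + 1) / 2 by omega,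
      show r - (r - l + 1) / 2 = r - 1 - (r - 1 - (l + 1) + 1) / 2 by omega,
      PySem.List.pyRange_one_cons (by omega : l < l + 1 + (r - 1 - (l + 1) + 1 + 1) / 2),
      PySem.List.pyRange_neg_one_cons (by omega : r - 1 - (r - 1 - (l + 1) + 1) / 2 < r)]
  set lows' := PySem.List.pyRange (l + 1) (l + 1 + (r - 1 - (l + 1) + 1 + 1) / 2) 1 with hl'
  set highs' := PySem.List.pyRange (r - 1) (r - 1 - (r - 1 - (l + 1) + 1) / 2) (-1) with hh'
  unfold tailMerge
  simp only [List.zip_cons_cons, List.flatMap_cons, List.length_cons]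
  by_cases hlen : lows'.length > highs'.length
  · have hne : lows' ≠ [] := by
      intro hnil; rw [hnil] at hlen; simp at hlen
    simp [hlen, PySem.List.pyGet?_neg_one, getLast?_cons_ne l lows' hne]
  · simp [hlen]

theorem go_eq (m : Nat) : ∀ l r acc, (r - l).toNat ≤ m →
    constructArrayGo l r acc = acc ++ tailSpec l r := by
  induction m with
  | zero =>
    intro l r acc hm
    unfold constructArrayGo
    rw [dif_neg (by omega : ¬ l < r)]
    by_cases he : l = r
    · subst he; simp [tailSpec_single]
    · simp [he, tailSpec_nil l r (by omega)]
  | succ m ih =>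
    intro l r acc hm
    unfold constructArrayGo
    by_cases hlr : l < r
    · rw [dif_pos hlr, ih _ _ _ (by omega), tailSpec_step l r hlr]
      simp
    · rw [dif_neg hlr]
      by_cases he : l = r
      · subst he; simp [tailSpec_single]
      · simp [he, tailSpec_nil l r (by omega)]

-- ===== VERDICT (by name: the statement is the Claim_ definition above) =====
theorem constructArray_spec : Claim_equal_constructArray := by
  intro n k _
  unfold Spec_constructArray constructArray
  rw [show n - (k + 1) + 1 = n - k by ring,
      go_eq (n - (n - k)).toNat (n - k) n _ (le_refl _)]
  simp only [constructArray_alt, tailSpec, tailMerge, fd2_eq]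
  rw [show n - (n - k) + 1 + 1 = k + 1 + 1 by ring,
      show n - (n - k) + 1 = k + 1 by ring]
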